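-- pv_equiv track=rewrite | github.com/0stetti/ucoe-discovery-pipeline | ucoe_pipeline/structural/nucleosome.py | count_poly_at_tracts
-- ===== SOURCE A (Python) =====
-- def count_poly_at_tracts(seq: str, min_length: int = 5) -> list[tuple[int, int, str]]:
--     """Find poly(dA) and poly(dT) tracts of at least min_length bp.
--
--     These tracts are strong nucleosome exclusion signals.
--
--     Returns list of (start, end, base) tuples.
--     """
--     seq = seq.upper()
--     tracts = []
--     i = 0
--     while i < len(seq):
--         if seq[i] in ("A", "T"):
--             base = seq[i]
--             j = i
--             while j < len(seq) and seq[j] == base: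
--                 j += 1
--             if j - i >= min_length:
--                 tracts.append((i, j, base))
--             i = j
--         else:
--             i += 1
--     return tracts
-- ===== SOURCE B (Python) =====
-- def count_poly_at_tracts(seq: str, min_length: int = 5) -> list[tuple[int, int, str]]:
--     """Find poly(dA)/poly(dT) tracts of at least min_length bp.
--
--     Boundary-list formulation: compute all run boundaries in one comprehension,
--     then pair consecutive boundaries and keep the A/T runs that are long enough.
--     """
--     s = seq.upper()
--     n = len(s)
--     cuts = [k for k in range(n + 1) if k == 0 or k == n or s[k] != s[k - 1]]
--     return [(a, b, s[a]) for a, b in zip(cuts, cuts[1:])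
--             if s[a] in "AT" and b - a >= min_length]
-- ===== Notes on version B (the rewrite author's own statement) =====
-- stated objective: alternative
-- what changed: A scans with nested two-pointer while-loops that skip over each A/T run; B instead builds the list of all run boundaries in one comprehension over range(n+1), zips consecutive boundaries into (start, end) runs, and filters the long-enough A/T runs.
import Mathlib
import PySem

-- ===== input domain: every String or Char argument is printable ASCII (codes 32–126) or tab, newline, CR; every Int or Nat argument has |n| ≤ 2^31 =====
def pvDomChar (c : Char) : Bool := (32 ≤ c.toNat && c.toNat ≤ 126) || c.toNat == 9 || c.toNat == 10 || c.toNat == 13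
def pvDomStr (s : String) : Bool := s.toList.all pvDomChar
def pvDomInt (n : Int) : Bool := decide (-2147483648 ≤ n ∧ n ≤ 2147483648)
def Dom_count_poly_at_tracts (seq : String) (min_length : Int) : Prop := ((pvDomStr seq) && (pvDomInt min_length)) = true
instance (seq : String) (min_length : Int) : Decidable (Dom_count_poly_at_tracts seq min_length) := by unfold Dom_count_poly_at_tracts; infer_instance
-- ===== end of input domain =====

-- B replaces A's nested two-pointer scan by a boundary-list construction (all run
-- boundaries collected in one comprehension, consecutive boundaries zipped into runs);
-- objective: alternative (same linear cost, different algorithmic decomposition).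

-- ===== PORT A =====
-- inner `while j < len(seq) and seq[j] == base: j += 1`
def pvRunEnd (s : List Char) (base : Char) (j : Nat) : Nat :=
  if j < s.length ∧ s[j]! = base then pvRunEnd s base (j + 1) else j
termination_by s.length - j
decreasing_by omega

-- cited by pvALoop's decreasing_by (allowed above the ports for termination)
theorem pvRunEnd_ge (s : List Char) (base : Char) (j : Nat) : j ≤ pvRunEnd s base j := by
  unfold pvRunEnd
  split
  · have := pvRunEnd_ge s base (j + 1); omega
  · exact Nat.le_refl j
termination_by s.length - j
decreasing_by omega

-- outer `while i < len(seq): …`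
def pvALoop (s : List Char) (min_length : Int) (i : Nat) : List (Int × Int × String) :=
  if h : i < s.length then
    if s[i]! = 'A' ∨ s[i]! = 'T' then
      (if ((pvRunEnd s (s[i]!) i : Nat) : Int) - (i : Int) ≥ min_length then
          [((i : Int), ((pvRunEnd s (s[i]!) i : Nat) : Int), String.mk [s[i]!])] else [])
        ++ pvALoop s min_length (pvRunEnd s (s[i]!) i)
    else
      pvALoop s min_length (i + 1)
  else []
termination_by s.length - i
decreasing_by
  · have h1 : pvRunEnd s (s[i]!) i = pvRunEnd s (s[i]!) (i + 1) := by
      rw [pvRunEnd]; simp [h]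
    have h2 := pvRunEnd_ge s (s[i]!) (i + 1)
    omega
  · omega

def count_poly_at_tracts (seq : String) (min_length : Int) : List (Int × Int × String) :=
  pvALoop (PySem.Str.upper seq).toList min_length 0

-- ===== PORT B =====
-- cuts = [k for k in range(n+1) if k == 0 or k == n or s[k] != s[k-1]]
def pvCuts (s : List Char) : List Nat :=
  (List.range (s.length + 1)).filter (fun k => k == 0 || k == s.length || (s[k]? != s[k - 1]?))

-- [(a, b, s[a]) for a, b in zip(cuts, cuts[1:]) if s[a] in "AT" and b - a >= min_length]
def pvBGo (s : List Char) (min_length : Int) : List (Int × Int × String) :=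
  ((pvCuts s).zip (pvCuts s).tail).filterMap (fun p =>
    if (s[p.1]! = 'A' ∨ s[p.1]! = 'T') ∧ (p.2 : Int) - (p.1 : Int) ≥ min_length then
      some ((p.1 : Int), (p.2 : Int), String.mk [s[p.1]!])
    else none)

def count_poly_at_tracts_alt (seq : String) (min_length : Int) : List (Int × Int × String) :=
  pvBGo (PySem.Str.upper seq).toList min_length

-- ===== PRECONDITION & SPEC =====
def Spec_count_poly_at_tracts (seq : String) (min_length : Int) (out : List (Int × Int × String)) : Prop := out = count_poly_at_tracts_alt seq min_length
instance (seq : String) (min_length : Int) (out : List (Int × Int × String)) : Decidable (Spec_count_poly_at_tracts seq min_length out) := by unfold Spec_count_poly_at_tracts; infer_instance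

-- ===== CLAIM (what is proved, stated in full; the proofs are below) =====
def Claim_equal_count_poly_at_tracts : Prop := ∀ (seq : String) (min_length : Int), Dom_count_poly_at_tracts seq min_length → Spec_count_poly_at_tracts seq min_length (count_poly_at_tracts seq min_length)

-- ===== LEMMAS AND PROOFS =====

-- mediator: the list of maximal runs of s, with absolute (start, end, char)
def pvRuns (ofs : Nat) (l : List Char) : List (Nat × Nat × Char) :=
  match l with
  | [] => []
  | c :: rest =>
      (ofs, ofs + 1 + (rest.takeWhile (· == c)).length, c) ::
        pvRuns (ofs + 1 + (rest.takeWhile (· == c)).length) (rest.dropWhile (· == c))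
termination_by l.length
decreasing_by
  have := List.length_dropWhile_le (fun x => x == c) rest
  simp; omega

def pvOut (min_length : Int) (rs : List (Nat × Nat × Char)) : List (Int × Int × String) :=
  rs.filterMap (fun r =>
    if (r.2.2 = 'A' ∨ r.2.2 = 'T') ∧ (r.2.1 : Int) - (r.1 : Int) ≥ min_length then
      some ((r.1 : Int), (r.2.1 : Int), String.mk [r.2.2])
    else none)

theorem pv_getBang_eq {s : List Char} {i : Nat} (h : i < s.length) : s[i]! = s[i] := by
  rw [List.getElem!_eq_getElem?_getD, List.getElem?_eq_getElem h]; rfl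

-- A side ----------------------------------------------------------------
theorem pvRunEnd_eq (s : List Char) (base : Char) (j : Nat) :
    pvRunEnd s base j = j + ((s.drop j).takeWhile (· == base)).length := by
  rw [pvRunEnd]
  split
  · rename_i hcond
    obtain ⟨hlt, heq⟩ := hcond
    rw [pv_getBang_eq hlt] at heq
    rw [List.drop_eq_getElem_cons hlt, List.takeWhile_cons]
    simp only [heq, beq_self_eq_true, if_true]
    have := pvRunEnd_eq s base (j + 1)
    simp only [List.length_cons]
    omega
  · rename_i hcond
    by_cases hlt : j < s.length
    · have hne : s[j] ≠ base := by
        intro he; exact hcond ⟨hlt, by rw [pv_getBang_eq hlt]; exact he⟩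
      rw [List.drop_eq_getElem_cons hlt, List.takeWhile_cons]
      simp [hne]
    · rw [List.drop_eq_nil_of_le (by omega)]
      simp
termination_by s.length - j
decreasing_by omega

theorem pvOut_cons (ml : Int) (r : Nat × Nat × Char) (rs : List (Nat × Nat × Char)) :
    pvOut ml (r :: rs) =
      (if (r.2.2 = 'A' ∨ r.2.2 = 'T') ∧ (r.2.1 : Int) - (r.1 : Int) ≥ ml then
        [((r.1 : Int), (r.2.1 : Int), String.mk [r.2.2])] else []) ++ pvOut ml rs := by
  unfold pvOut
  rw [List.filterMap_cons]
  by_cases h : (r.2.2 = 'A' ∨ r.2.2 = 'T') ∧ (r.2.1 : Int) - (r.1 : Int) ≥ ml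
  · simp [h]
  · simp [h]

theorem pvOut_runs_cons_notAT (ml : Int) (c : Char) (rest : List Char) (ofs : Nat)
    (hc : ¬(c = 'A' ∨ c = 'T')) :
    pvOut ml (pvRuns ofs (c :: rest)) = pvOut ml (pvRuns (ofs + 1) rest) := by
  rw [pvRuns, pvOut_cons, if_neg (fun hx => hc hx.1)]
  simp only [List.nil_append]
  match rest with
  | [] => simp [pvRuns, pvOut]
  | d :: r2 =>
    by_cases hd : d = c
    · subst hd
      rw [List.takeWhile_cons_of_pos (by simp), List.dropWhile_cons_of_pos (by simp)]
      conv_rhs => rw [pvRuns]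
      rw [pvOut_cons, if_neg (fun hx => hc hx.1)]
      simp only [List.nil_append]
      congr 2
      simp only [List.length_cons]
      omega
    · rw [List.takeWhile_cons_of_neg (by simp [hd]), List.dropWhile_cons_of_neg (by simp [hd])]
      simp

theorem pv_drop_add (s : List Char) (j k : Nat) : s.drop (j + k) = (s.drop j).drop k := by
  induction j generalizing s with
  | zero => simp
  | succ n ih =>
    cases s with
    | nil => simp
    | cons a t =>
      rw [show n + 1 + k = (n + k) + 1 by omega, List.drop_succ_cons, List.drop_succ_cons, ih]

theorem pv_dropWhile_eq (p : Char → Bool) (l : List Char) :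
    l.drop (l.takeWhile p).length = l.dropWhile p := by
  induction l with
  | nil => simp
  | cons a t ih =>
    by_cases hp : p a <;> simp [List.takeWhile_cons, List.dropWhile_cons, hp, ih]

theorem pvALoop_eq (s : List Char) (ml : Int) (i : Nat) :
    pvALoop s ml i = pvOut ml (pvRuns i (s.drop i)) := by
  rw [pvALoop]
  split
  · rename_i h
    rw [pv_getBang_eq h]
    split
    · rename_i hAT
      have hre : pvRunEnd s (s[i]) i = i + 1 + ((s.drop (i + 1)).takeWhile (· == s[i])).length := by
        rw [pvRunEnd_eq, List.drop_eq_getElem_cons h, List.takeWhile_cons]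
        simp only [beq_self_eq_true, if_true, List.length_cons]
        omega
      have hdrop : s.drop (pvRunEnd s (s[i]) i) = (s.drop (i + 1)).dropWhile (· == s[i]) := by
        rw [hre, pv_drop_add s (i + 1), pv_dropWhile_eq]
      rw [pvALoop_eq s ml (pvRunEnd s (s[i]) i), hdrop]
      conv_rhs => rw [List.drop_eq_getElem_cons h, pvRuns]
      rw [pvOut_cons]
      simp only [hre]
      rw [if_congr (and_iff_right hAT) rfl rfl]
    · rename_i hAT
      rw [pvALoop_eq s ml (i + 1)]
      conv_rhs => rw [List.drop_eq_getElem_cons h]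
      rw [pvOut_runs_cons_notAT ml (s[i]) (s.drop (i + 1)) i hAT]
  · rename_i h
    rw [List.drop_eq_nil_of_le (by omega)]
    simp [pvRuns, pvOut]
termination_by s.length - i
decreasing_by
  · rename_i h hAT
    have heq : pvRunEnd s (s[i]) i = pvRunEnd s (s[i]) (i + 1) := by
      rw [pvRunEnd, if_pos ⟨h, pv_getBang_eq h⟩]
    have := pvRunEnd_ge s (s[i]) (i + 1)
    omega
  · rename_i h hAT
    omega

-- B side ----------------------------------------------------------------
theorem pvCuts_append_run (t v : List Char) (c : Char) (ht : t ≠ [])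
    (hall : ∀ x ∈ t, x = c) (hv : v.head? ≠ some c) :
    pvCuts (t ++ v) = 0 :: (pvCuts v).map (fun k => t.length + k) := by
  obtain ⟨m', hm⟩ : ∃ m', t.length = m' + 1 := by
    cases t with
    | nil => simp at ht
    | cons a b => exact ⟨b.length, by simp⟩
  unfold pvCuts
  have hlen : (t ++ v).length + 1 = t.length + (v.length + 1) := by
    simp [List.length_append]
    omega
  rw [hlen, List.range_add, List.filter_append]
  have part1 : (List.range t.length).filter
      (fun k => k == 0 || k == (t ++ v).length || ((t ++ v)[k]? != (t ++ v)[k - 1]?)) = [0] := by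
    rw [hm, List.range_succ_eq_map, List.filter_cons]
    simp only [beq_self_eq_true, Bool.true_or, if_true]
    rw [List.filter_map]
    have hnil : (List.range m').filter
        ((fun k => k == 0 || k == (t ++ v).length || ((t ++ v)[k]? != (t ++ v)[k - 1]?)) ∘ Nat.succ) = [] := by
      rw [List.filter_eq_nil_iff]
      intro a ha
      simp only [List.mem_range] at ha
      have h1 : a + 1 < t.length := by omega
      have hga : (t ++ v)[a]? = some c := by
        rw [List.getElem?_append_left (by omega), List.getElem?_eq_getElem (by omega)]
        exact congrArg some (hall _ (List.getElem_mem _))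
      have hga1 : (t ++ v)[a + 1]? = some c := by
        rw [List.getElem?_append_left (by omega), List.getElem?_eq_getElem (by omega)]
        exact congrArg some (hall _ (List.getElem_mem _))
      simp only [Function.comp, Nat.succ_eq_add_one]
      simp [hga, hga1]
      omega
    rw [hnil]
    simp
  have part2 : ((List.range (v.length + 1)).map (fun x => t.length + x)).filter
      (fun k => k == 0 || k == (t ++ v).length || ((t ++ v)[k]? != (t ++ v)[k - 1]?))
      = ((List.range (v.length + 1)).filter
          (fun k => k == 0 || k == v.length || (v[k]? != v[k - 1]?))).map (fun k => t.length + k) := by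
    rw [List.filter_map]
    congr 1
    apply List.filter_congr
    intro k hk
    simp only [List.mem_range] at hk
    simp only [Function.comp]
    have hlen2 : (t ++ v).length = t.length + v.length := List.length_append
    by_cases hk0 : k = 0
    · subst hk0
      simp only [Nat.add_zero, beq_self_eq_true, Bool.true_or, Bool.or_true, Bool.true_eq]
      have hm1 : (t ++ v)[t.length - 1]? = some c := by
        rw [List.getElem?_append_left (by omega), List.getElem?_eq_getElem (by omega)]
        exact congrArg some (hall _ (List.getElem_mem _))
      by_cases hvnil : v = []
      · subst hvnil
        simp [hlen2]
      · have hv0 : (t ++ v)[t.length]? = v.head? := by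
          rw [List.getElem?_append_right (by omega)]
          simp [List.head?_eq_getElem?]
        have hne : ((t ++ v)[t.length]? != (t ++ v)[t.length - 1]?) = true := by
          rw [hv0, hm1, bne_iff_ne]
          exact hv
        simp [hne]
    · have e1 : (t ++ v)[t.length + k]? = v[k]? := by
        rw [List.getElem?_append_right (by omega)]
        congr 1
        omega
      have e2 : (t ++ v)[t.length + k - 1]? = v[k - 1]? := by
        rw [List.getElem?_append_right (by omega)]
        congr 1
        omega
      have b0 : (t.length + k == 0) = false := by
        simp; omega
      have b0' : (k == 0) = false := by
        simp [hk0]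
      have bl : (t.length + k == (t ++ v).length) = (k == v.length) := by
        by_cases hkv : k = v.length
        · simp [hkv, hlen2]
        · have : t.length + k ≠ (t ++ v).length := by omega
          simp [hkv, this]
      rw [e1, e2, b0, b0', bl]
  rw [part1, part2]
  rfl

theorem pv_head_dropWhile (p : Char → Bool) (l : List Char) (a : Char)
    (h : (l.dropWhile p).head? = some a) : p a = false := by
  induction l with
  | nil => simp [List.dropWhile] at h
  | cons b t ih =>
    by_cases hb : p b
    · rw [List.dropWhile_cons_of_pos hb] at h
      exact ih h
    · rw [List.dropWhile_cons_of_neg hb] at h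
      simp only [List.head?_cons, Option.some.injEq] at h
      subst h
      simpa using hb

theorem pv_cuts_mem {s : List Char} {k : Nat} (h : k ∈ pvCuts s) : k ≤ s.length := by
  unfold pvCuts at h
  have := (List.mem_filter.1 h).1
  simp only [List.mem_range] at this
  omega

theorem pv_cuts_pairwise (s : List Char) : List.Pairwise (· < ·) (pvCuts s) :=
  List.Pairwise.filter _ (List.pairwise_lt_range)

theorem pv_zip_tail_lt {l : List Nat} (hl : List.Pairwise (· < ·) l) :
    ∀ p ∈ l.zip l.tail, p.1 < p.2 := by
  induction l with
  | nil => simp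
  | cons a t ih =>
    cases t with
    | nil => simp
    | cons b t2 =>
      intro p hp
      simp only [List.tail_cons, List.zip_cons_cons, List.mem_cons] at hp
      rcases hp with rfl | hp
      · exact (List.pairwise_cons.1 hl).1 b (by simp)
      · exact ih (List.pairwise_cons.1 hl).2 p (by simpa using hp)

theorem pv_filterMap_congr {α β : Type} {f g : α → Option β} {l : List α}
    (h : ∀ a ∈ l, f a = g a) : l.filterMap f = l.filterMap g := by
  induction l with
  | nil => simp
  | cons a t ih =>
    rw [List.filterMap_cons, List.filterMap_cons, h a (by simp),
        ih (fun x hx => h x (by simp [hx]))]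

theorem pv_filterMap_if_cons {α β : Type} (C : α → Prop) [DecidablePred C] (e : α → β)
    (a : α) (l : List α) :
    (a :: l).filterMap (fun x => if C x then some (e x) else none)
      = (if C a then [e a] else []) ++ l.filterMap (fun x => if C x then some (e x) else none) := by
  rw [List.filterMap_cons]
  by_cases h : C a <;> simp [h]

theorem pvOut_shift (ml : Int) (m : Nat) (rs : List (Nat × Nat × Char)) :
    pvOut ml (rs.map (fun r => (m + r.1, m + r.2.1, r.2.2))) =
      (pvOut ml rs).map (fun e => ((m : Int) + e.1, (m : Int) + e.2.1, e.2.2)) := by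
  induction rs with
  | nil => simp [pvOut]
  | cons r t ih =>
    rw [List.map_cons, pvOut_cons, pvOut_cons, List.map_append, ih]
    congr 1
    by_cases hc : (r.2.2 = 'A' ∨ r.2.2 = 'T') ∧ (r.2.1 : Int) - (r.1 : Int) ≥ ml
    · rw [if_pos hc, if_pos ⟨hc.1, by push_cast; omega⟩]
      simp only [List.map_cons, List.map_nil]
      congr 1
    · rw [if_neg hc, if_neg (fun hh => hc ⟨hh.1, by
        have := hh.2
        push_cast at this ⊢
        omega⟩)]
      simp

theorem pvCuts_head (v : List Char) : ∃ cv, pvCuts v = 0 :: cv := by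
  unfold pvCuts
  rw [List.range_succ_eq_map, List.filter_cons]
  simp

theorem pvRuns_shift (d : Nat) (l : List Char) :
    pvRuns d l = (pvRuns 0 l).map (fun r => (d + r.1, d + r.2.1, r.2.2)) := by
  match l with
  | [] => simp [pvRuns]
  | c :: rest =>
    rw [pvRuns, pvRuns]
    rw [pvRuns_shift (d + 1 + (rest.takeWhile (· == c)).length) (rest.dropWhile (· == c)),
        pvRuns_shift (0 + 1 + (rest.takeWhile (· == c)).length) (rest.dropWhile (· == c))]
    simp only [List.map_cons, List.map_map]
    congr 1
    · simp [Prod.ext_iff]; omega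
    · apply List.map_congr_left
      intro r _
      simp [Function.comp, Prod.ext_iff]; omega
termination_by l.length
decreasing_by
  all_goals
    have := List.length_dropWhile_le (fun x => x == c) rest
    simp only [List.length_cons]
    omega

theorem pvBGo_eq (s : List Char) (ml : Int) : pvBGo s ml = pvOut ml (pvRuns 0 s) := by
  match s with
  | [] =>
    simp [pvBGo, pvCuts, pvRuns, pvOut, List.range_succ]
  | c :: rest =>
    have hsplit : c :: rest = (c :: rest.takeWhile (· == c)) ++ rest.dropWhile (· == c) := by
      rw [List.cons_append, List.takeWhile_append_dropWhile]
    have hall : ∀ x ∈ c :: rest.takeWhile (· == c), x = c := by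
      intro x hx
      rcases List.mem_cons.1 hx with rfl | hx
      · rfl
      · simpa using List.mem_takeWhile_imp hx
    have hv : (rest.dropWhile (· == c)).head? ≠ some c := by
      intro hh
      have := pv_head_dropWhile (· == c) rest c hh
      simp at this
    have hcuts : pvCuts (c :: rest) =
        0 :: (pvCuts (rest.dropWhile (· == c))).map
          (fun k => 0 + 1 + (rest.takeWhile (· == c)).length + k) := by
      have h1 := pvCuts_append_run (c :: rest.takeWhile (· == c)) (rest.dropWhile (· == c)) c
        (by simp) hall hv
      rw [← hsplit] at h1
      rw [h1]
      congr 1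
      apply List.map_congr_left
      intro a _
      simp only [List.length_cons]
      omega
    obtain ⟨cv, hcv⟩ := pvCuts_head (rest.dropWhile (· == c))
    have hIH : ((0 :: cv).zip cv).filterMap (fun p =>
        if ((rest.dropWhile (· == c))[p.1]! = 'A' ∨ (rest.dropWhile (· == c))[p.1]! = 'T')
            ∧ (p.2 : Int) - (p.1 : Int) ≥ ml then
          some ((p.1 : Int), (p.2 : Int), String.mk [(rest.dropWhile (· == c))[p.1]!])
        else none) = pvOut ml (pvRuns 0 (rest.dropWhile (· == c))) := by
      have h2 := pvBGo_eq (rest.dropWhile (· == c)) ml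
      unfold pvBGo at h2
      rw [hcv] at h2
      simpa using h2
    have hulen : (c :: rest).length
        = 0 + 1 + (rest.takeWhile (· == c)).length + (rest.dropWhile (· == c)).length := by
      conv_lhs => rw [hsplit]
      have hl : (rest.takeWhile (· == c)).length + (rest.dropWhile (· == c)).length = rest.length := by
        rw [← List.length_append, List.takeWhile_append_dropWhile]
      simp [List.length_append]
      omega
    have hlook : ∀ i : Nat, i < (rest.dropWhile (· == c)).length →
        (c :: rest)[0 + 1 + (rest.takeWhile (· == c)).length + i]! = (rest.dropWhile (· == c))[i]! := by
      intro i hi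
      rw [List.getElem!_eq_getElem?_getD, List.getElem!_eq_getElem?_getD]
      have hq : (c :: rest)[0 + 1 + (rest.takeWhile (· == c)).length + i]?
          = (rest.dropWhile (· == c))[i]? := by
        rw [hsplit, List.getElem?_append_right (by simp; omega)]
        congr 1
        simp
        omega
      rw [hq]
    unfold pvBGo
    rw [hcuts, List.tail_cons, hcv, List.map_cons, List.zip_cons_cons]
    rw [show ((0 + 1 + (rest.takeWhile (· == c)).length + 0)
          :: cv.map (fun k => 0 + 1 + (rest.takeWhile (· == c)).length + k))
        = (0 :: cv).map (fun k => 0 + 1 + (rest.takeWhile (· == c)).length + k) from by simp]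
    rw [List.zip_map, pvRuns, pvOut_cons]
    rw [pv_filterMap_if_cons (fun p : Nat × Nat =>
        ((c :: rest)[p.1]! = 'A' ∨ (c :: rest)[p.1]! = 'T') ∧ (p.2 : Int) - (p.1 : Int) ≥ ml)
      (fun p : Nat × Nat => ((p.1 : Int), (p.2 : Int), String.mk [(c :: rest)[p.1]!]))]
    have hc0 : (c :: rest)[(0 : Nat)]! = c := by
      rw [List.getElem!_eq_getElem?_getD]
      simp
    refine congrArg₂ (· ++ ·) ?_ ?_
    · -- heads
      refine if_congr ?_ ?_ rfl
      · rw [hc0]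
        constructor
        · rintro ⟨h1, h2⟩
          exact ⟨h1, by push_cast at h2 ⊢; omega⟩
        · rintro ⟨h1, h2⟩
          exact ⟨h1, by push_cast at h2 ⊢; omega⟩
      · rw [hc0]
        simp
    · -- tails
      rw [List.filterMap_map]
      rw [pv_filterMap_congr (g := fun p : Nat × Nat =>
          (if ((rest.dropWhile (· == c))[p.1]! = 'A' ∨ (rest.dropWhile (· == c))[p.1]! = 'T')
              ∧ (p.2 : Int) - (p.1 : Int) ≥ ml then
            some ((p.1 : Int), (p.2 : Int), String.mk [(rest.dropWhile (· == c))[p.1]!])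
          else none).map (fun e => (((0 + 1 + (rest.takeWhile (· == c)).length : Nat) : Int) + e.1,
              ((0 + 1 + (rest.takeWhile (· == c)).length : Nat) : Int) + e.2.1, e.2.2)))
        (by
          intro p hp
          have hp1 : p.1 ∈ pvCuts (rest.dropWhile (· == c)) := by
            rw [hcv]
            exact (List.of_mem_zip hp).1
          have hp2 : p.2 ∈ pvCuts (rest.dropWhile (· == c)) := by
            rw [hcv]
            exact List.mem_cons_of_mem _ (List.of_mem_zip hp).2
          have hlt : p.1 < p.2 := by
            have hpw := pv_cuts_pairwise (rest.dropWhile (· == c))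
            rw [hcv] at hpw
            exact pv_zip_tail_lt hpw p hp
          have hp1l : p.1 < (rest.dropWhile (· == c)).length := by
            have := pv_cuts_mem hp2
            omega
          simp only [Function.comp_apply, Prod.map_apply, Prod.map_fst, Prod.map_snd]
          rw [hlook p.1 hp1l]
          by_cases hcnd : ((rest.dropWhile (· == c))[p.1]! = 'A' ∨ (rest.dropWhile (· == c))[p.1]! = 'T')
              ∧ (p.2 : Int) - (p.1 : Int) ≥ ml
          · rw [if_pos ⟨hcnd.1, by have := hcnd.2; push_cast at this ⊢; omega⟩, if_pos hcnd]
            simp only [Option.map_some, Option.some.injEq, Prod.mk.injEq]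
            refine ⟨by push_cast; ring, by push_cast; ring, trivial⟩
          · rw [if_neg (fun hh => hcnd ⟨hh.1, by
                have := hh.2
                push_cast at this ⊢
                omega⟩), if_neg hcnd]
            simp)]
      rw [← List.map_filterMap, hIH, pvRuns_shift (0 + 1 + (rest.takeWhile (· == c)).length),
        pvOut_shift]
termination_by s.length
decreasing_by
  have := List.length_dropWhile_le (fun x => x == c) rest
  simp only [List.length_cons]
  omega

-- ===== VERDICT (by name: the statement is the Claim_ definition above) =====
theorem count_poly_at_tracts_spec : Claim_equal_count_poly_at_tracts := by
  intro seq ml _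
  unfold Spec_count_poly_at_tracts count_poly_at_tracts count_poly_at_tracts_alt
  rw [pvBGo_eq]
  have := pvALoop_eq (PySem.Str.upper seq).toList ml 0
  simpa using this
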